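-- pv_equiv track=rewrite | github.com/zwecrab/research_demo | backup/demo1.py | count_consecutive_messages
-- ===== SOURCE A (Python) =====
-- def count_consecutive_messages(conversation_history, speaker):
--     """Count consecutive messages from the same speaker at the end of conversation"""
--     if not conversation_history:
--         return 0
--
--     count = 0
--     for entry in reversed(conversation_history):
--         if speaker in entry:
--             count += 1
--         else:
--             break
--     return count
-- ===== SOURCE B (Python) =====
-- def count_consecutive_messages(conversation_history, speaker):
--     """Count consecutive messages from the same speaker at the end of conversation"""
--     count = 0
--     for entry in conversation_history:
--         if speaker in entry:
--             count += 1
--         else: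
--             count = 0
--     return count
-- ===== Notes on version B (the rewrite author's own statement) =====
-- stated objective: alternative
-- what changed: B scans forward once, resetting a counter on mismatch, instead of A's reversed-iteration with break; the trailing-run length falls out without reversing.
import Mathlib
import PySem

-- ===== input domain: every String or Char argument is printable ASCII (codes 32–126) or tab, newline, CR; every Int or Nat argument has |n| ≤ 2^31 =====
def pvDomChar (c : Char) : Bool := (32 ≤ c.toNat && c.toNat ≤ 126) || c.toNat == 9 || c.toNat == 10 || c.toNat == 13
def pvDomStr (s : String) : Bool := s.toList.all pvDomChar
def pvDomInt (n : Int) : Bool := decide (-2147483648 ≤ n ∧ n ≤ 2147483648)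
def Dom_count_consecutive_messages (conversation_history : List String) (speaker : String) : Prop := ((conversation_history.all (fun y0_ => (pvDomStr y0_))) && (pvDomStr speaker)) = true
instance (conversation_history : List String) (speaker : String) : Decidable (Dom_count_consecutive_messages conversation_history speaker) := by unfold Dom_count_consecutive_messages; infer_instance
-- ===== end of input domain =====

-- B replaces A's reversed-iteration-with-break by a single forward pass that resets its
-- counter on every non-matching entry (objective: alternative decomposition, same cost).

-- ===== PORT A =====
-- for entry in reversed(history): if speaker in entry: count += 1 else: break
def pvA_loop (speaker : String) : List String → Int → Int
  | [], count => count
  | entry :: rest, count =>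
      if PySem.Str.isIn speaker entry then pvA_loop speaker rest (count + 1)
      else count

def count_consecutive_messages (conversation_history : List String) (speaker : String) : Int :=
  if conversation_history = [] then 0
  else pvA_loop speaker conversation_history.reverse 0

-- ===== PORT B =====
def count_consecutive_messages_alt (conversation_history : List String) (speaker : String) : Int :=
  conversation_history.foldl
    (fun count entry => if PySem.Str.isIn speaker entry then count + 1 else 0) 0

-- ===== PRECONDITION & SPEC =====
def Spec_count_consecutive_messages (conversation_history : List String) (speaker : String) (out : Int) : Prop := out = count_consecutive_messages_alt conversation_history speaker
instance (conversation_history : List String) (speaker : String) (out : Int) : Decidable (Spec_count_consecutive_messages conversation_history speaker out) := by unfold Spec_count_consecutive_messages; infer_instance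

-- ===== CLAIM (what is proved, stated in full; the proofs are below) =====
def Claim_equal_count_consecutive_messages : Prop := ∀ (conversation_history : List String) (speaker : String), Dom_count_consecutive_messages conversation_history speaker → Spec_count_consecutive_messages conversation_history speaker (count_consecutive_messages conversation_history speaker)

-- ===== LEMMAS AND PROOFS =====

-- A's break-loop accumulates: running it with count c adds c to running it with 0.
theorem pvA_loop_acc (speaker : String) (xs : List String) (c : Int) :
    pvA_loop speaker xs c = c + pvA_loop speaker xs 0 := by
  induction xs generalizing c with
  | nil => simp [pvA_loop]
  | cons e t ih =>
      simp only [pvA_loop]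
      split
      · rw [ih (c + 1), ih (0 + 1)]; ring
      · ring

-- B's fold over xs ++ [e] in terms of the fold over xs.
theorem pvB_snoc (speaker : String) (xs : List String) (e : String) :
    count_consecutive_messages_alt (xs ++ [e]) speaker
      = (if PySem.Str.isIn speaker e
          then count_consecutive_messages_alt xs speaker + 1 else 0) := by
  simp [count_consecutive_messages_alt, List.foldl_append]

theorem pv_main (speaker : String) (xs : List String) :
    pvA_loop speaker xs.reverse 0 = count_consecutive_messages_alt xs speaker := by
  induction xs using List.reverseRecOn with
  | nil => simp [pvA_loop, count_consecutive_messages_alt]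
  | append_singleton ys e ih =>
      rw [pvB_snoc]
      simp only [List.reverse_append, List.reverse_singleton, List.singleton_append, pvA_loop]
      split
      · rw [pvA_loop_acc, ih]; ring
      · rfl

-- ===== VERDICT (by name: the statement is the Claim_ definition above) =====
theorem count_consecutive_messages_spec : Claim_equal_count_consecutive_messages := by
  intro xs speaker _
  unfold Spec_count_consecutive_messages count_consecutive_messages
  split
  · subst xs; rfl
  · exact pv_main speaker xs
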